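-- pv_equiv track=rewrite | github.com/oelithon/estudo-projeto-restaurant-orders | src/analyze_log.py | most_requested_meal_by_maria
-- ===== SOURCE A (Python) =====
-- def most_requested_meal_by_maria(orders_list):
--     maria_orders = dict()
--
--     for name, order, day in orders_list:
--         if name == 'maria':
--             if order not in maria_orders:
--                 maria_orders[order] = 1
--             else:
--                 maria_orders[order] += 1
--
--     favorite_plate = max(maria_orders, key=maria_orders.get)
--
--     return favorite_plate
-- ===== SOURCE B (Python) =====
-- def most_requested_meal_by_maria(orders_list):
--     meals = [order for name, order, day in orders_list if name == 'maria']
--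
--     # repeated partition-extraction: peel off all copies of the first remaining
--     # meal at once, recording (multiplicity, meal) in first-occurrence order
--     runs = []
--     rest = meals
--     while rest:
--         first = rest[0]
--         runs.append((rest.count(first), first))
--         rest = [x for x in rest if x != first]
--
--     best = max(c for c, _ in runs)
--     return next(m for c, m in runs if c == best)
-- ===== Notes on version B (the rewrite author's own statement) =====
-- stated objective: alternative
-- what changed: B replaces A's incrementally-maintained frequency dict and max(key=dict.get) with repeated partition-extraction: it peels each distinct meal off the list at once (count + filter), building (multiplicity, meal) runs in first-occurrence order, then takes max of the counts and the first run attaining it.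
import Mathlib
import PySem

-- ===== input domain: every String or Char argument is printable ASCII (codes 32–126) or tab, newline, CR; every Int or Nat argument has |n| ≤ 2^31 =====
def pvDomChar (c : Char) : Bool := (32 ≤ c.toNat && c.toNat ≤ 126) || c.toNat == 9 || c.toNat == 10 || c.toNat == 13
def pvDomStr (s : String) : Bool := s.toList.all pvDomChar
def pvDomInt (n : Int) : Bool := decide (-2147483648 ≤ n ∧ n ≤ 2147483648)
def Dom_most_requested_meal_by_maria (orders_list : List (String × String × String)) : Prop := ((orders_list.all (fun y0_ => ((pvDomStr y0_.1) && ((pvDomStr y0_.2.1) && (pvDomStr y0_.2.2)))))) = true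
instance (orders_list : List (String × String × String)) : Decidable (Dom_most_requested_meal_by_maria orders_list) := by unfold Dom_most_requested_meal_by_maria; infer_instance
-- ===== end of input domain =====

-- B replaces A's incrementally-maintained frequency dict + max(key=dict.get) with repeated
-- partition-extraction (peel all copies of the first remaining meal at once, building
-- (multiplicity, meal) runs in first-occurrence order), then max of counts + first match.


-- ===== PORT A =====
-- A: build a dict counting Maria's orders ('if order not in d: d[order] = 1 else: d[order] += 1'),
-- then 'max(maria_orders, key=maria_orders.get)': max? over the keys in insertion order with the
-- stored count as key ('.getD k 0' equals 'd.get(k)' on every key of the dict).  max? = none is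
-- exactly where Python raises ValueError (no 'maria' order); that case is excluded by Pre_.
def most_requested_meal_by_maria (orders_list : List (String × String × String)) : String :=
  let maria_orders : PySem.Dict String Int :=
    orders_list.foldl (fun d t =>
      if t.1 == "maria" then
        if d.contains t.2.1 = false then d.insert t.2.1 1
        else d.modify t.2.1 0 (fun v => v + 1)
      else d) (PySem.Dict.mk [])
  (PySem.List.max? maria_orders.keys (fun k => maria_orders.getD k 0)).getD ""

-- ===== PORT B =====
-- B's while loop 'while rest: first = rest[0]; runs.append((rest.count(first), first));
-- rest = [x for x in rest if x != first]' — recursion on the shrinking 'rest'.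
def pvTally : List String → List (Int × String)
  | [] => []
  | first :: t =>
      (((PySem.List.count (first :: t) first : Nat) : Int), first)
        :: pvTally ((first :: t).filter (fun x => x != first))
  termination_by rest => rest.length
  decreasing_by
    simp only [List.filter_cons, bne_self_eq_false, Bool.false_eq_true, if_false,
      List.length_cons]
    exact Nat.lt_succ_of_le (List.length_filter_le _ _)

-- B: meals = Maria's meals in order; runs = pvTally meals;
--    best = max(c for c, _ in runs)   (raises ValueError on empty runs — excluded by Pre_);
--    next(m for c, m in runs if c == best).
def most_requested_meal_by_maria_alt (orders_list : List (String × String × String)) : String :=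
  let meals : List String :=
    (orders_list.filter (fun t => t.1 == "maria")).map (fun t => t.2.1)
  let runs := pvTally meals
  let best := (PySem.List.max? (runs.map Prod.fst) (fun c => c)).getD 0
  ((runs.find? (fun p => p.1 == best)).map Prod.snd).getD ""

-- ===== PRECONDITION & SPEC =====
-- Pre_ excludes exactly the inputs with no 'maria' entry: there both A and B raise ValueError
-- (max() of an empty dict / empty generator).
def Pre_most_requested_meal_by_maria (orders_list : List (String × String × String)) : Prop :=
  ∃ t ∈ orders_list, t.1 = "maria"
instance (orders_list : List (String × String × String)) : Decidable (Pre_most_requested_meal_by_maria orders_list) := by unfold Pre_most_requested_meal_by_maria; infer_instance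
def pvWitness_most_requested_meal_by_maria : (List (String × String × String)) :=
  [("maria", "pizza", "monday"), ("joao", "soup", "monday"), ("maria", "pizza", "tuesday")]
def Spec_most_requested_meal_by_maria (orders_list : List (String × String × String)) (out : String) : Prop := out = most_requested_meal_by_maria_alt orders_list
instance (orders_list : List (String × String × String)) (out : String) : Decidable (Spec_most_requested_meal_by_maria orders_list out) := by unfold Spec_most_requested_meal_by_maria; infer_instance

-- ===== CLAIM (what is proved, stated in full; the proofs are below) =====
def Claim_equal_most_requested_meal_by_maria : Prop := ∀ (orders_list : List (String × String × String)), Dom_most_requested_meal_by_maria orders_list → Pre_most_requested_meal_by_maria orders_list → Spec_most_requested_meal_by_maria orders_list (most_requested_meal_by_maria orders_list)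

-- ===== LEMMAS AND PROOFS =====

theorem pvFind?_key (s : List String) (o : String) :
    s.find? (fun k => k == o) = if o ∈ s then some o else none := by
  induction s with
  | nil => rfl
  | cons k s ih =>
    by_cases h : k = o
    · subst h; simp
    · simp [h, Ne.symm h, ih]

def pvCounter (l : List String) : PySem.Dict String Int :=
  PySem.Dict.mk ((PySem.Set.ofList l).map (fun k => (k, (List.count k l : Int))))

theorem pvCounter_get? (l : List String) (o : String) :
    (pvCounter l).get? o = if o ∈ l then some ((List.count o l : Int)) else none := by
  unfold pvCounter PySem.Dict.get?
  rw [show ((PySem.Dict.mk ((PySem.Set.ofList l).map (fun k => (k, (List.count k l : Int))))).items)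
      = (PySem.Set.ofList l).map (fun k => (k, (List.count k l : Int))) from rfl,
    List.find?_map]
  have : ((fun p => p.1 == o) ∘ fun k => ((k, (List.count k l : Int)) : String × Int)) = (fun k => k == o) := rfl
  rw [this, pvFind?_key]
  by_cases h : o ∈ PySem.Set.ofList l
  · rw [if_pos h, if_pos ((PySem.Set.mem_ofList l o).mp h)]; rfl
  · rw [if_neg h, if_neg (fun hm => h ((PySem.Set.mem_ofList l o).mpr hm))]; rfl

theorem pvCounter_contains (l : List String) (o : String) :
    (pvCounter l).contains o = decide (o ∈ l) := by
  unfold PySem.Dict.contains pvCounter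
  rw [List.any_map]
  have hc : ((fun p => p.1 == o) ∘ fun k => ((k, (List.count k l : Int)) : String × Int)) = (fun k => k == o) := rfl
  rw [hc]
  by_cases h : o ∈ l
  · simp [PySem.Set.mem_ofList, h]
  · simp [PySem.Set.mem_ofList, h]
    exact fun x hx hxo => h (hxo ▸ hx)

theorem pvOfList_append {α : Type} [BEq α] [LawfulBEq α] (l : List α) (o : α) :
    PySem.Set.ofList (l ++ [o]) =
      if o ∈ l then PySem.Set.ofList l else PySem.Set.ofList l ++ [o] := by
  have h1 : PySem.Set.ofList (l ++ [o]) = PySem.Set.add (PySem.Set.ofList l) o := by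
    simp [PySem.Set.ofList, List.foldl_append]
  rw [h1]
  unfold PySem.Set.add
  by_cases h : o ∈ l
  · rw [if_pos (by simp [PySem.Set.mem_ofList, h]), if_pos h]
  · rw [if_neg (by simp [PySem.Set.mem_ofList, h]), if_neg h]

def pvCStep (d : PySem.Dict String Int) (o : String) : PySem.Dict String Int :=
  if d.contains o = false then d.insert o 1 else d.modify o 0 (fun v => v + 1)

theorem pvCStep_counter (l : List String) (o : String) :
    pvCStep (pvCounter l) o = pvCounter (l ++ [o]) := by
  unfold pvCStep
  rw [pvCounter_contains]
  by_cases h : o ∈ l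
  · rw [if_neg (by simp [h])]
    unfold PySem.Dict.modify PySem.Dict.getD
    rw [pvCounter_get?, if_pos h, Option.getD_some]
    unfold PySem.Dict.insert
    rw [pvCounter_contains, if_pos (by simp [h])]
    show PySem.Dict.mk _ = _
    unfold pvCounter
    rw [pvOfList_append, if_pos h]
    congr 1
    show List.map _ (List.map _ _) = _
    rw [List.map_map]
    apply List.map_congr_left
    intro k hk
    by_cases hko : k = o
    · subst hko
      simp [Function.comp, List.count_append]
    · simp [Function.comp, hko, List.count_append, Ne.symm hko]
  · rw [if_pos (by simp [h])]
    unfold PySem.Dict.insert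
    rw [pvCounter_contains, if_neg (by simp [h])]
    show PySem.Dict.mk _ = _
    unfold pvCounter
    rw [pvOfList_append, if_neg h, List.map_append]
    congr 1
    congr 1
    · apply List.map_congr_left
      intro k hk
      have hko : k ≠ o := fun he => h (he ▸ (PySem.Set.mem_ofList l k).mp hk)
      simp [List.count_append, Ne.symm hko]
    · simp [List.count_append, List.count_eq_zero_of_not_mem h]

theorem pvCounter_fold (l : List String) :
    l.foldl pvCStep (PySem.Dict.mk []) = pvCounter l := by
  induction l using List.reverseRecOn with
  | nil => simp [pvCounter, PySem.Set.ofList, PySem.Set.empty]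
  | append_singleton l o ih => rw [List.foldl_append]; simp [ih, pvCStep_counter]

theorem pvCounter_keys (l : List String) : (pvCounter l).keys = PySem.Set.ofList l := by
  unfold pvCounter PySem.Dict.keys
  rw [show (PySem.Dict.mk ((PySem.Set.ofList l).map (fun k => (k, (List.count k l : Int))))).items
      = (PySem.Set.ofList l).map (fun k => (k, (List.count k l : Int))) from rfl, List.map_map]
  simp [Function.comp_def]

theorem pvCounter_getD (l : List String) (o : String) :
    (pvCounter l).getD o 0 = (List.count o l : Int) := by
  unfold PySem.Dict.getD
  rw [pvCounter_get?]
  by_cases h : o ∈ l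
  · rw [if_pos h]; rfl
  · rw [if_neg h]; simp [List.count_eq_zero_of_not_mem h]

theorem pvFoldA (orders : List (String × String × String)) (d : PySem.Dict String Int) :
    orders.foldl (fun d t =>
      if t.1 == "maria" then
        if d.contains t.2.1 = false then d.insert t.2.1 1
        else d.modify t.2.1 0 (fun v => v + 1)
      else d) d
    = ((orders.filter (fun t => t.1 == "maria")).map (fun t => t.2.1)).foldl pvCStep d := by
  induction orders generalizing d with
  | nil => rfl
  | cons t ts ih =>
    simp only [List.foldl_cons, List.filter_cons]
    by_cases h : t.1 = "maria"
    · have hb : (t.1 == "maria") = true := by simp [h]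
      rw [if_pos hb, if_pos hb]
      simp only [List.map_cons, List.foldl_cons]
      exact ih _
    · have hb : ¬ ((t.1 == "maria") = true) := by simp [h]
      rw [if_neg hb, if_neg hb]
      exact ih d

-- ===== B-side lemmas =====

-- Set.ofList peels off the first element and all its later copies.
theorem pvOfList_cons_filter (l : List String) (x : String) :
    PySem.Set.ofList (x :: l) = x :: PySem.Set.ofList (l.filter (fun y => y != x)) := by
  induction l using List.reverseRecOn with
  | nil => rfl
  | append_singleton l o ih =>
    rw [show x :: (l ++ [o]) = (x :: l) ++ [o] from rfl, pvOfList_append, List.filter_append]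
    by_cases hox : o = x
    · subst hox
      rw [if_pos (by simp), ih]
      simp
    · rw [List.filter_cons]
      simp only [bne_iff_ne, ne_eq, hox, not_false_eq_true, if_pos, List.filter_nil,
        pvOfList_append]
      by_cases h : o ∈ l
      · rw [if_pos (by simp [h]), ih, if_pos (by simp [h, hox])]
      · rw [if_neg (by simp [h, hox]), ih, if_neg (by simp [hox]; exact h)]
        rfl

-- pvTally computes (multiplicity, meal) over the distinct meals in first-occurrence order.
theorem pvTally_eq (l : List String) :
    pvTally l = (PySem.Set.ofList l).map (fun k => (((List.count k l : Nat) : Int), k)) := by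
  induction hn : l.length using Nat.strong_induction_on generalizing l with
  | _ n ih =>
    cases l with
    | nil => simp [pvTally]
    | cons x t =>
      rw [show pvTally (x :: t)
            = (((PySem.List.count (x :: t) x : Nat) : Int), x)
                :: pvTally ((x :: t).filter (fun y => y != x)) from by
          simp [pvTally], pvOfList_cons_filter, List.map_cons]
      have hfl : (x :: t).filter (fun y => y != x) = t.filter (fun y => y != x) := by
        simp
      have hlen : (t.filter (fun y => y != x)).length < n := by
        subst hn
        exact Nat.lt_succ_of_le (List.length_filter_le _ _)
      rw [hfl, ih _ hlen _ rfl]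
      refine congrArg₂ List.cons rfl (List.map_congr_left ?_)
      intro k hk
      have hkmem : k ∈ t.filter (fun y => y != x) := (PySem.Set.mem_ofList _ k).mp hk
      have hkx : (k != x) = true := (List.mem_filter.mp hkmem).2
      have : List.count k (t.filter (fun y => y != x)) = List.count k t :=
        List.count_filter hkx
      have hx : List.count k (x :: t) = List.count k t := by
        rw [List.count_cons]
        simp [show ¬ (x == k) = true from by
          intro hxx; exact absurd (by simp [eq_of_beq hxx]) (bne_iff_ne.mp hkx)]
      rw [this, hx]

-- the running-max fold used by max?, first extremal
theorem pvFoldlOptStep {α : Type} (key : α → Int) (ys : List α) (a : α) :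
    List.foldl (fun acc x =>
      match acc with
      | none => some x
      | some m => if key m < key x then some x else some m) (some a) ys
    = some (List.foldl (fun a y => if key a < key y then y else a) a ys) := by
  induction ys generalizing a with
  | nil => rfl
  | cons y ys ih =>
    simp only [List.foldl_cons]
    by_cases h : key a < key y
    · rw [if_pos h, if_pos h]; exact ih y
    · rw [if_neg h, if_neg h]; exact ih a

theorem pvKeyFoldl {α : Type} (key : α → Int) (ys : List α) (x : α) :
    key (List.foldl (fun a y => if key a < key y then y else a) x ys)
    = List.foldl (fun a y => max a (key y)) (key x) ys := by
  induction ys generalizing x with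
  | nil => rfl
  | cons y ys ih =>
    simp only [List.foldl_cons]
    by_cases h : key x < key y
    · rw [if_pos h, max_eq_right (le_of_lt h)]; exact ih y
    · rw [if_neg h, max_eq_left (not_lt.mp h)]; exact ih x

theorem pvLeFoldl {α : Type} (key : α → Int) (ys : List α) (x : α) :
    key x ≤ key (List.foldl (fun a y => if key a < key y then y else a) x ys) := by
  induction ys generalizing x with
  | nil => exact le_refl _
  | cons y ys ih =>
    simp only [List.foldl_cons]
    by_cases h : key x < key y
    · rw [if_pos h]; exact le_of_lt (lt_of_lt_of_le h (ih y))
    · rw [if_neg h]; exact ih x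

-- max? returns the FIRST element attaining the maximal key.
theorem pvFindMax {α : Type} (key : α → Int) (ys : List α) (x : α) :
    (x :: ys).find? (fun z =>
        key z == key (List.foldl (fun a y => if key a < key y then y else a) x ys))
    = some (List.foldl (fun a y => if key a < key y then y else a) x ys) := by
  induction ys generalizing x with
  | nil => simp
  | cons y ys ih =>
    simp only [List.foldl_cons]
    by_cases h : key x < key y
    · rw [if_pos h]
      set r := List.foldl (fun a y => if key a < key y then y else a) y ys with hr
      have hxne : key x ≠ key r := by
        refine ne_of_lt (lt_of_lt_of_le h ?_)
        rw [hr]; exact pvLeFoldl key ys y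
      have hx'' : ¬ ((fun z => key z == key r) x = true) := by simpa using hxne
      rw [List.find?_cons_of_neg (p := fun z => key z == key r) hx'']
      have hthis := ih y
      rw [← hr] at hthis
      exact hthis
    · rw [if_neg h]
      set r := List.foldl (fun a y => if key a < key y then y else a) x ys with hr
      have hthis := ih x
      rw [← hr] at hthis
      by_cases hxr : ((fun z => key z == key r) x = true)
      · rw [List.find?_cons_of_pos (p := fun z => key z == key r) hxr]
        rw [List.find?_cons_of_pos (p := fun z => key z == key r) hxr] at hthis
        exact hthis
      · have hxle : key x ≤ key r := by rw [hr]; exact pvLeFoldl key ys x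
        have hxne : key x ≠ key r := by simpa using hxr
        have hxlt : key x < key r := lt_of_le_of_ne hxle hxne
        have hyne : key y ≠ key r := ne_of_lt (lt_of_le_of_lt (not_lt.mp h) hxlt)
        have hy'' : ¬ ((fun z => key z == key r) y = true) := by simpa using hyne
        rw [List.find?_cons_of_neg (p := fun z => key z == key r) hxr,
          List.find?_cons_of_neg (p := fun z => key z == key r) hy'']
        rw [List.find?_cons_of_neg (p := fun z => key z == key r) hxr] at hthis
        exact hthis

-- ===== VERDICT (by name: the statement is the Claim_ definition above) =====
theorem most_requested_meal_by_maria_spec : Claim_equal_most_requested_meal_by_maria := by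
  intro orders _hdom hpre
  unfold Spec_most_requested_meal_by_maria
  simp only [most_requested_meal_by_maria, most_requested_meal_by_maria_alt]
  rw [pvFoldA, pvCounter_fold, pvCounter_keys, pvTally_eq]
  set meals := (orders.filter (fun t => t.1 == "maria")).map (fun t => t.2.1) with hmeals
  set cnt : String → Int := fun k => ((List.count k meals : Nat) : Int) with hcnt
  have hkey : (fun k => (pvCounter meals).getD k 0) = cnt := by
    funext k; rw [pvCounter_getD]
  rw [hkey]
  -- meals is nonempty under Pre_
  obtain ⟨t, htmem, htname⟩ := hpre
  have hne : meals ≠ [] := by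
    have : t.2.1 ∈ meals := by
      rw [hmeals]
      exact List.mem_map_of_mem (List.mem_filter.mpr ⟨htmem, by simp [htname]⟩)
    exact List.ne_nil_of_mem this
  obtain ⟨s, S', hS⟩ := List.exists_cons_of_ne_nil
    (show PySem.Set.ofList meals ≠ [] by
      cases hm : meals with
      | nil => exact absurd hm hne
      | cons a b => rw [pvOfList_cons_filter]; exact List.cons_ne_nil _ _)
  rw [hS]
  set r := List.foldl (fun a y => if cnt a < cnt y then y else a) s S' with hrdef
  -- A side
  have hA : PySem.List.max? (s :: S') cnt = some r := by
    unfold PySem.List.max?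
    rw [List.foldl_cons]
    exact pvFoldlOptStep cnt S' s
  rw [hA, Option.getD_some]
  -- B side: best = cnt r
  have hbest :
      (PySem.List.max? (((s :: S').map (fun k => (cnt k, k))).map Prod.fst) (fun c => c)).getD 0
      = cnt r := by
    rw [List.map_map]
    have : (Prod.fst ∘ fun k => ((cnt k, k) : Int × String)) = cnt := rfl
    rw [this, List.map_cons, PySem.List.max?_id_cons, Option.getD_some, List.foldl_map,
      hrdef, pvKeyFoldl cnt S' s]
  rw [hbest]
  -- B side: find? over the mapped runs
  rw [List.find?_map]
  have hcomp : ((fun p => p.1 == cnt r) ∘ fun k => ((cnt k, k) : Int × String))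
      = (fun z => cnt z == cnt r) := rfl
  rw [hcomp, hrdef, pvFindMax cnt S' s]
  rfl
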